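-- pv_equiv track=rewrite | github.com/vs-uulm/nemesys | src/nemere/visualization/simplePrint.py | alignDescreteValues
-- ===== SOURCE A (Python) =====
-- from typing import Tuple, Iterable, Sequence, Dict, List, Union
--
-- def alignDescreteValues(listA: list, listB: list) -> Tuple[list, list]:
--     """
--     Insert None-elements in both lists to place each value in the interval of the first list's values
--     at index i like (i-1, i].
--
--     In other words: align B to A with b <= a for all b in B, a in A.
--
--     As a consequence exchangin A and B in the parameters will yield a different result.
--
--     :param listA: the dominant list
--     :param listB: the recessive list
--     :return: two lists aligned by inserted Nones.
--         The gapped dominant list is the first in the tuple.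
--         Each of its values will be larger or equal to all values of the recessive gapped list up to the same index.
--     """
--     rest = listB.copy()
--     newA = list()
--     newB = list()
--     for valA in listA:
--         consume = 0  # stays 0 until something is to consume in rest
--         while len(rest) > consume and rest[consume] <= valA:
--             consume += 1  # items at beginning of rest <= current valA
--
--         if consume == 0:
--             newA.append(valA)
--             newB.append(None)
--         if consume > 0:
--             newA.extend([None]*(consume-1) + [valA])
--             newB.extend(rest[:consume])
--         rest = rest[consume:]
--     if len(rest) > 0:
--         newA.extend([None]*len(rest))
--         newB.extend(rest)
--
--     return newA, newB
-- ===== SOURCE B (Python) =====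
-- def alignDescreteValues(listA, listB):
--     newA = []
--     newB = []
--     j = 0
--     n = len(listB)
--     for valA in listA:
--         start = j
--         while j < n and listB[j] <= valA:
--             j += 1
--         if j == start:
--             newA.append(valA)
--             newB.append(None)
--         else:
--             newA.extend([None] * (j - start - 1) + [valA])
--             newB.extend(listB[start:j])
--     newA.extend([None] * (n - j))
--     newB.extend(listB[j:])
--     return newA, newB
-- ===== Notes on version B (the rewrite author's own statement) =====
-- stated objective: faster
-- what changed: B keeps a single index pointer into listB and scans it once, instead of A's copying/re-slicing of the remaining suffix (rest[:consume], rest[consume:]) on every outer iteration.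
import Mathlib
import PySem

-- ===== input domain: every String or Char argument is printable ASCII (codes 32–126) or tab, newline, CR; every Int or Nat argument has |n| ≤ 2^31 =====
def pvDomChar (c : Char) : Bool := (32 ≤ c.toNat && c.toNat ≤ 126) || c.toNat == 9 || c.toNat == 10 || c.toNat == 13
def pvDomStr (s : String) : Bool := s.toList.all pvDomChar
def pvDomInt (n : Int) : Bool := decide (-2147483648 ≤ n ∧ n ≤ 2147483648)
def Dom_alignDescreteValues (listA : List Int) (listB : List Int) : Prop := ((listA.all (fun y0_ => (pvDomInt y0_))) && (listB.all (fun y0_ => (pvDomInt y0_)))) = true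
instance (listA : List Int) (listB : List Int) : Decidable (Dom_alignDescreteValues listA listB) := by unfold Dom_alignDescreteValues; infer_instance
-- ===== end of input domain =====

-- B replaces A's per-iteration copying/re-slicing of the remaining suffix of listB by a single
-- index pointer scanned once over listB (objective: faster, O(n+m) instead of O(n*m)).
-- No argument is mutated; equivalence is about the return value.

-- ===== PORT A =====
-- the inner while loop: count how many leading items of rest are <= valA
def aConsume (valA : Int) : List Int → Nat
  | [] => 0
  | x :: xs => if x ≤ valA then aConsume valA xs + 1 else 0

-- the outer for loop over listA with state (rest, newA, newB); the trailing
-- 'if len(rest) > 0' extend is the nil case (extending by [] is the identity)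
def aLoop : List Int → List Int → List (Option Int) → List (Option Int) → List (Option Int) × List (Option Int)
  | [], rest, newA, newB => (newA ++ rest.map (fun _ => none), newB ++ rest.map some)
  | valA :: as, rest, newA, newB =>
    let c := aConsume valA rest
    if c = 0 then
      aLoop as (rest.drop c) (newA ++ [some valA]) (newB ++ [none])
    else
      aLoop as (rest.drop c) (newA ++ (List.replicate (c - 1) none ++ [some valA])) (newB ++ (rest.take c).map some)

def alignDescreteValues (listA : List Int) (listB : List Int) : List (Option Int) × List (Option Int) :=
  aLoop listA listB [] []

-- ===== PORT B =====
-- the inner while loop: advance index j while j < len(listB) and listB[j] <= valA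
def bAdvance (listB : List Int) (valA : Int) (j : Nat) : Nat :=
  if h : j < listB.length then
    if listB[j] ≤ valA then bAdvance listB valA (j + 1) else j
  else j
termination_by listB.length - j

-- the outer for loop over listA carrying the pointer j; listB[start:j] is take/drop (in-range slice)
def bLoop (listB : List Int) : List Int → Nat → List (Option Int) → List (Option Int) → List (Option Int) × List (Option Int)
  | [], j, newA, newB => (newA ++ List.replicate (listB.length - j) none, newB ++ (listB.drop j).map some)
  | valA :: as, j, newA, newB =>
    let j' := bAdvance listB valA j
    if j' = j then bLoop listB as j' (newA ++ [some valA]) (newB ++ [none])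
    else bLoop listB as j' (newA ++ (List.replicate (j' - j - 1) none ++ [some valA])) (newB ++ ((listB.drop j).take (j' - j)).map some)

def alignDescreteValues_alt (listA : List Int) (listB : List Int) : List (Option Int) × List (Option Int) :=
  bLoop listB listA 0 [] []

-- ===== PRECONDITION & SPEC =====
def Spec_alignDescreteValues (listA : List Int) (listB : List Int) (out : List (Option Int) × List (Option Int)) : Prop := out = alignDescreteValues_alt listA listB
instance (listA : List Int) (listB : List Int) (out : List (Option Int) × List (Option Int)) : Decidable (Spec_alignDescreteValues listA listB out) := by unfold Spec_alignDescreteValues; infer_instance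

-- ===== CLAIM (what is proved, stated in full; the proofs are below) =====
def Claim_equal_alignDescreteValues : Prop := ∀ (listA : List Int) (listB : List Int), Dom_alignDescreteValues listA listB → Spec_alignDescreteValues listA listB (alignDescreteValues listA listB)

-- ===== LEMMAS AND PROOFS =====

theorem aConsume_le (valA : Int) (rest : List Int) : aConsume valA rest ≤ rest.length := by
  induction rest with
  | nil => simp [aConsume]
  | cons x xs ih => simp only [aConsume, List.length_cons]; split <;> omega

theorem bAdvance_eq (listB : List Int) (valA : Int) (j : Nat) (hj : j ≤ listB.length) :
    bAdvance listB valA j = j + aConsume valA (listB.drop j) := by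
  by_cases h : j < listB.length
  · rw [bAdvance, dif_pos h]
    rw [← List.getElem_cons_drop h, aConsume]
    split
    · rw [bAdvance_eq listB valA (j + 1) (by omega)]; omega
    · simp
  · have : j = listB.length := by omega
    subst this
    rw [bAdvance]
    simp [aConsume]
termination_by listB.length - j

theorem loop_eq (listB : List Int) (as : List Int) :
    ∀ (j : Nat) (newA newB : List (Option Int)), j ≤ listB.length →
    aLoop as (listB.drop j) newA newB = bLoop listB as j newA newB := by
  induction as with
  | nil =>
    intro j newA newB hj
    simp [aLoop, bLoop, List.map_const']
  | cons valA as ih =>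
    intro j newA newB hj
    have hc : aConsume valA (listB.drop j) ≤ listB.length - j := by
      have := aConsume_le valA (listB.drop j)
      simpa using this
    have hadv := bAdvance_eq listB valA j hj
    set c := aConsume valA (listB.drop j) with hcdef
    simp only [aLoop, bLoop, ← hcdef, hadv]
    have hdd : (listB.drop j).drop c = listB.drop (j + c) := by
      rw [List.drop_drop]
    by_cases h0 : c = 0
    · simp only [h0, Nat.add_zero, if_pos, List.drop_zero]
      exact ih j _ _ hj
    · rw [if_neg h0, if_neg (by omega : ¬ j + c = j)]
      rw [hdd, (by omega : j + c - j = c)]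
      exact ih (j + c) _ _ (by omega)

-- ===== VERDICT (by name: the statement is the Claim_ definition above) =====
theorem alignDescreteValues_spec : Claim_equal_alignDescreteValues := by
  intro listA listB _
  unfold Spec_alignDescreteValues alignDescreteValues alignDescreteValues_alt
  have := loop_eq listB listA 0 [] [] (by omega)
  simpa using this
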